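-- pv_equiv track=rewrite | github.com/khalil-research/CaVE | test/test_optmodel.py | checkVisited
-- ===== SOURCE A (Python) =====
-- from collections import defaultdict
--
-- def checkVisited(active_edges):
--     """
--     A method to check all nodes are visted once
--     """
--     # count visited
--     node_counts = defaultdict(int)
--     for i, j in active_edges:
--         node_counts[i] += 1
--         node_counts[j] += 1
--     # check if each node connects exactly two edges
--     if any(count != 2 for count in node_counts.values()):
--         return False
--     else:
--         return True
-- ===== SOURCE B (Python) =====
-- def checkVisited(active_edges):
--     """
--     A method to check all nodes are visted once
--     (sort-then-group: flatten endpoints, sort, every run must have length 2)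
--     """
--     endpoints = []
--     for i, j in active_edges:
--         endpoints.append(i)
--         endpoints.append(j)
--     endpoints.sort()
--     if not endpoints:
--         return True
--     prev = endpoints[0]
--     run = 1
--     for x in endpoints[1:]:
--         if x == prev:
--             run += 1
--         else:
--             if run != 2:
--                 return False
--             prev = x
--             run = 1
--     return run == 2
-- ===== Notes on version B (the rewrite author's own statement) =====
-- stated objective: alternative
-- what changed: Replaces the defaultdict degree-count table by flattening all edge endpoints into one list, sorting it, and scanning it once checking that every run of equal values has length exactly 2.
import Mathlib
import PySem

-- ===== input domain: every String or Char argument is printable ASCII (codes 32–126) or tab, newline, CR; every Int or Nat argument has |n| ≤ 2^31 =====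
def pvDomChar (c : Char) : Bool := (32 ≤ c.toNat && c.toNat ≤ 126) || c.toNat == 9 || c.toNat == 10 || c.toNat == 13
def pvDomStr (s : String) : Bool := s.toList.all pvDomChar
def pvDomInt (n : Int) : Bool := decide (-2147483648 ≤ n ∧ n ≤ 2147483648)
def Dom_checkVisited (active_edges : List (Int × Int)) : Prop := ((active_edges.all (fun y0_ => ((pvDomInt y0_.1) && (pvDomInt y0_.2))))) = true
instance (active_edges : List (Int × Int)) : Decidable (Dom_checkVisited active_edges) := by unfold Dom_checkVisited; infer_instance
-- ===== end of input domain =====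

-- B replaces A's hash-count table by flatten-endpoints, sort, and a single run-length scan (alternative algorithm, same result).


-- ===== PORT A =====
-- node_counts = defaultdict(int); for i,j in active_edges: node_counts[i]+=1; node_counts[j]+=1
def checkVisited (active_edges : List (Int × Int)) : Bool :=
  let node_counts : PySem.Dict Int Int :=
    active_edges.foldl
      (fun d p => (d.modify p.1 0 (· + 1)).modify p.2 0 (· + 1))
      PySem.Dict.empty
  if node_counts.values.any (fun count => count ≠ 2) then false else true

-- ===== PORT B =====
-- the run-length scan over the tail of the sorted endpoint list (prev, run are the loop state)
def runLoop (prev : Int) (run : Int) : List Int → Bool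
  | [] => run == 2
  | x :: xs =>
    if x == prev then runLoop prev (run + 1) xs
    else if run ≠ 2 then false
    else runLoop x 1 xs

def checkVisited_alt (active_edges : List (Int × Int)) : Bool :=
  let endpoints :=
    active_edges.foldl (fun acc p => (acc ++ [p.1]) ++ [p.2]) []
  let sortedEndpoints := PySem.List.sorted endpoints (fun x => x) false
  match sortedEndpoints with
  | [] => true
  | x :: rest => runLoop x 1 rest

-- ===== PRECONDITION & SPEC =====
def Spec_checkVisited (active_edges : List (Int × Int)) (out : Bool) : Prop := out = checkVisited_alt active_edges
instance (active_edges : List (Int × Int)) (out : Bool) : Decidable (Spec_checkVisited active_edges out) := by unfold Spec_checkVisited; infer_instance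

-- ===== CLAIM (what is proved, stated in full; the proofs are below) =====
def Claim_equal_checkVisited : Prop := ∀ (active_edges : List (Int × Int)), Dom_checkVisited active_edges → Spec_checkVisited active_edges (checkVisited active_edges)

-- ===== LEMMAS AND PROOFS =====

-- flattened endpoint list
def pvFlat (xs : List (Int × Int)) : List Int := xs.flatMap (fun p => [p.1, p.2])

-- "every node appears exactly twice among the endpoints"
def pvAllTwo (l : List Int) : Prop := ∀ k ∈ l, l.count k = 2

lemma flatten_foldl (xs : List (Int × Int)) : ∀ acc : List Int,
    xs.foldl (fun acc p => (acc ++ [p.1]) ++ [p.2]) acc = acc ++ pvFlat xs := by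
  induction xs with
  | nil => intro acc; simp [pvFlat]
  | cons p t ih =>
      intro acc
      simp only [pvFlat, List.flatMap_cons, List.foldl_cons] at *
      rw [ih]; simp

lemma dict_foldl_eq (xs : List (Int × Int)) : ∀ d : PySem.Dict Int Int,
    xs.foldl (fun d p => (d.modify p.1 0 (· + 1)).modify p.2 0 (· + 1)) d
      = (pvFlat xs).foldl (fun d x => d.modify x 0 (· + 1)) d := by
  induction xs with
  | nil => intro d; simp [pvFlat]
  | cons p t ih =>
      intro d
      simp only [pvFlat, List.flatMap_cons, List.foldl_cons] at *
      rw [ih, List.foldl_append, List.foldl_cons, List.foldl_cons, List.foldl_nil]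

lemma a_iff (xs : List (Int × Int)) :
    checkVisited xs = true ↔ pvAllTwo (pvFlat xs) := by
  unfold checkVisited
  rw [dict_foldl_eq, ← PySem.Dict.counter_eq_foldl]
  show (if ((PySem.Dict.counter (pvFlat xs)).values.any fun count => decide (count ≠ 2)) = true
      then false else true) = true ↔ pvAllTwo (pvFlat xs)
  rw [PySem.Dict.values_eq_map_keys _ (PySem.Dict.nodup_keys_counter _) 0]
  simp only [PySem.Dict.keys_counter, PySem.Dict.getD_counter, pvAllTwo,
    List.any_map, List.any_eq_true, PySem.Set.mem_ofList]
  constructor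
  · intro h k hk
    by_cases h2 : (pvFlat xs).count k = 2
    · exact h2
    · exfalso
      rw [if_pos ⟨k, hk, by simp; exact_mod_cast h2⟩] at h
      exact Bool.false_ne_true h
  · intro h
    rw [if_neg]
    rintro ⟨k, hk, hne⟩
    simp at hne
    exact hne (by exact_mod_cast h k hk)

lemma runLoop_iff (l : List Int) : ∀ (prev run : Int),
    (prev :: l).Pairwise (· ≤ ·) →
    (runLoop prev run l = true ↔
      (run + (l.count prev : Int) = 2 ∧ ∀ k ∈ l, k ≠ prev → l.count k = 2)) := by
  induction l with
  | nil =>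
    intro prev run _
    simp [runLoop]
  | cons x xs ih =>
    intro prev run hp
    have hp' : (x :: xs).Pairwise (· ≤ ·) := hp.of_cons
    have hpx : prev ≤ x := (List.pairwise_cons.mp hp).1 x (by simp)
    have hxxs : ∀ y ∈ xs, x ≤ y := (List.pairwise_cons.mp hp').1
    by_cases hx : x = prev
    · subst hx
      rw [runLoop, if_pos (by simp)]
      rw [ih x (run + 1) hp']
      constructor
      · rintro ⟨h1, h2⟩
        refine ⟨by simp only [List.count_cons_self]; push_cast; omega, ?_⟩
        intro k hk hkx
        rcases List.mem_cons.mp hk with h | h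
        · exact absurd h hkx
        · simpa [List.count_cons, hkx, Ne.symm hkx] using h2 k h hkx
      · rintro ⟨h1, h2⟩
        simp only [List.count_cons_self] at h1
        refine ⟨by push_cast at h1 ⊢; omega, ?_⟩
        intro k hk hkx
        simpa [List.count_cons, hkx, Ne.symm hkx] using h2 k (List.mem_cons_of_mem _ hk) hkx
    · have hlt : prev < x := lt_of_le_of_ne hpx (fun h => hx h.symm)
      have hall : ∀ y ∈ x :: xs, prev < y := by
        intro y hy
        rcases List.mem_cons.mp hy with h | h
        · exact h ▸ hlt
        · exact lt_of_lt_of_le hlt (hxxs y h)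
      have hnot : prev ∉ x :: xs := fun h => lt_irrefl _ (hall _ h)
      have hcnt0 : (x :: xs).count prev = 0 := List.count_eq_zero.mpr hnot
      rw [runLoop, if_neg (by simp [hx])]
      by_cases hrun : run = 2
      · rw [if_neg (by omega), ih x 1 hp']
        rw [hcnt0]
        constructor
        · rintro ⟨h1, h2⟩
          refine ⟨by omega, ?_⟩
          intro k hk _
          rcases List.mem_cons.mp hk with h | h
          · subst h
            simp only [List.count_cons_self]
            omega
          · by_cases hkx : k = x
            · subst hkx
              simp only [List.count_cons_self]
              omega
            · simpa [List.count_cons, hkx, Ne.symm hkx] using h2 k h hkx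
        · rintro ⟨-, h2⟩
          have hcx := h2 x (by simp) (fun h => hx h)
          simp only [List.count_cons_self] at hcx
          refine ⟨by omega, ?_⟩
          intro k hk hkx
          have := h2 k (List.mem_cons_of_mem _ hk) (ne_of_gt (hall k (List.mem_cons_of_mem _ hk)))
          simpa [List.count_cons, hkx, Ne.symm hkx] using this
      · rw [if_pos (by omega)]
        simp only [Bool.false_eq_true, false_iff]
        rintro ⟨h1, -⟩
        rw [hcnt0] at h1
        simp at h1
        omega

lemma pvAllTwo_perm {l l' : List Int} (h : l.Perm l') : pvAllTwo l ↔ pvAllTwo l' := by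
  unfold pvAllTwo
  constructor <;> intro hh k hk
  · rw [← h.count_eq]; exact hh k (h.mem_iff.mpr hk)
  · rw [h.count_eq]; exact hh k (h.mem_iff.mp hk)

lemma b_iff (xs : List (Int × Int)) :
    checkVisited_alt xs = true ↔ pvAllTwo (pvFlat xs) := by
  have hmain : ∀ s : List Int, s.Perm (pvFlat xs) → s.Pairwise (· ≤ ·) →
      ((match s with | [] => true | x :: rest => runLoop x 1 rest) = true
        ↔ pvAllTwo (pvFlat xs)) := by
    intro s hperm hpw
    rw [← pvAllTwo_perm hperm]
    cases s with
    | nil => simp [pvAllTwo]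
    | cons x rest =>
      rw [runLoop_iff rest x 1 hpw]
      constructor
      · rintro ⟨h1, h2⟩ k hk
        rcases List.mem_cons.mp hk with h | h
        · subst h
          simp only [List.count_cons_self]
          omega
        · by_cases hkx : k = x
          · subst hkx
            simp only [List.count_cons_self]
            omega
          · simpa [List.count_cons, hkx, Ne.symm hkx] using h2 k h hkx
      · intro h
        have hcx := h x (by simp)
        simp only [List.count_cons_self] at hcx
        refine ⟨by omega, ?_⟩
        intro k hk hkx
        simpa [List.count_cons, hkx, Ne.symm hkx] using h k (List.mem_cons_of_mem _ hk)
  simp only [checkVisited_alt, flatten_foldl, List.nil_append]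
  exact hmain _ (PySem.List.sorted_perm _ _ _) (PySem.List.sorted_pairwise _ _)

-- ===== VERDICT (by name: the statement is the Claim_ definition above) =====
theorem checkVisited_spec : Claim_equal_checkVisited := by
  intro xs _
  unfold Spec_checkVisited
  have h := (a_iff xs).trans (b_iff xs).symm
  cases hA : checkVisited xs <;> cases hB : checkVisited_alt xs <;> simp_all
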